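-- pv_equiv track=rewrite | github.com/schn27/aoc2024 | 20.py | get_cheat
-- ===== SOURCE A (Python) =====
-- def get_cheat(n):
--     if n < 2:
--         return None
--
--     res = set()
--     x, y = -n, 0
--     dx, dy = 1, -1
--
--     while (x, y) not in res:
--         res.add((x, y))
--         x, y = x + dx, y + dy
--         if x == 0 or y == 0:
--             dx, dy = -dy, dx
--
--     return res
-- ===== SOURCE B (Python) =====
-- def get_cheat(n):
--     if n < 2:
--         return None
--     bottom = [(a, abs(a) - n) for a in range(-n, n + 1)]
--     top = [(a, n - abs(a)) for a in range(n - 1, -n, -1)]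
--     return set(bottom + top)
-- ===== Notes on version B (the rewrite author's own statement) =====
-- stated objective: simpler
-- what changed: Replaces A's stateful perimeter walk (position, direction vector, axis-triggered rotation, loop-closure stop) with a direct closed-form enumeration of the diamond's points: the bottom half for a = -n..n and the top half for a = n-1 down to -n+1.
import Mathlib
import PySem

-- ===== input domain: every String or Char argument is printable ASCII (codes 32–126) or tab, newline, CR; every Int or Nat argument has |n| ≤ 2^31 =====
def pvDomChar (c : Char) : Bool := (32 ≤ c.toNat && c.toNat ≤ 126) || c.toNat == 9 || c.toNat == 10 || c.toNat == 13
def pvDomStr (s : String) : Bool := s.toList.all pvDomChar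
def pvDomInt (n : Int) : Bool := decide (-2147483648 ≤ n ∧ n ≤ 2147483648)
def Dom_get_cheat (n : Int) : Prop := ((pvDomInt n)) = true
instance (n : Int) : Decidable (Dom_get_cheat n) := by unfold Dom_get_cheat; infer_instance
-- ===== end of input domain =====

-- B replaces A's stateful perimeter walk (direction vector, axis-triggered rotation,
-- loop-closure stop) with a direct closed-form enumeration of the diamond's points
-- (objective: simpler).

-- ===== PORT A =====
-- the while loop, totalized with fuel (the loop itself closes after 4*n steps;
-- fuel (4*n+1).toNat is proved sufficient by the claim below)
def get_cheat_loop (fuel : Nat) (res : PySem.Set (Int × Int)) (x y dx dy : Int) :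
    List (Int × Int) :=
  match fuel with
  | 0 => res
  | f + 1 =>
    if PySem.Set.contains res (x, y) then res
    else
      if x + dx = 0 ∨ y + dy = 0 then
        get_cheat_loop f (PySem.Set.add res (x, y)) (x + dx) (y + dy) (-dy) dx
      else
        get_cheat_loop f (PySem.Set.add res (x, y)) (x + dx) (y + dy) dx dy

def get_cheat (n : Int) : Option (List (Int × Int)) :=
  if n < 2 then none
  else some (get_cheat_loop (4 * n + 1).toNat PySem.Set.empty (-n) 0 1 (-1))

-- ===== PORT B =====
def get_cheat_alt (n : Int) : Option (List (Int × Int)) :=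
  if n < 2 then none
  else
    some (PySem.Set.ofList
      ((PySem.List.pyRange (-n) (n + 1) 1).map (fun a => (a, |a| - n)) ++
       (PySem.List.pyRange (n - 1) (-n) (-1)).map (fun a => (a, n - |a|))))

-- ===== PRECONDITION & SPEC =====
def Spec_get_cheat (n : Int) (out : Option (List (Int × Int))) : Prop := out = get_cheat_alt n
instance (n : Int) (out : Option (List (Int × Int))) : Decidable (Spec_get_cheat n out) := by unfold Spec_get_cheat; infer_instance

-- ===== CLAIM (what is proved, stated in full; the proofs are below) =====
def Claim_equal_get_cheat : Prop := ∀ (n : Int), Dom_get_cheat n → Spec_get_cheat n (get_cheat n)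

-- ===== LEMMAS AND PROOFS =====

-- the k-th point added by A's walk (k = 0 .. 4n-1), and the direction held there
def pvP (n : Int) (k : Nat) : Int × Int :=
  if (k : Int) ≤ n then ((k : Int) - n, -(k : Int))
  else if (k : Int) ≤ 2 * n then ((k : Int) - n, (k : Int) - 2 * n)
  else if (k : Int) ≤ 3 * n then (3 * n - k, (k : Int) - 2 * n)
  else (3 * n - k, 4 * n - k)

def pvD (n : Int) (k : Nat) : Int × Int :=
  if (k : Int) < n then (1, -1)
  else if (k : Int) < 2 * n then (1, 1)
  else if (k : Int) < 3 * n then (-1, 1)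
  else (-1, -1)

theorem pvP_inj {n : Int} (hn : 2 ≤ n) {i j : Nat}
    (hi : (i : Int) < 4 * n) (hj : (j : Int) < 4 * n) (h : pvP n i = pvP n j) : i = j := by
  simp only [pvP, Prod.ext_iff] at h
  split_ifs at h <;> simp only at h <;> omega

theorem pvP_step {n : Int} (hn : 2 ≤ n) {k : Nat} (hk : (k : Int) < 4 * n) :
    pvP n (k + 1) = ((pvP n k).1 + (pvD n k).1, (pvP n k).2 + (pvD n k).2) := by
  simp only [pvP, pvD]
  push_cast
  split_ifs <;> simp only [Prod.ext_iff] <;> constructor <;> omega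

theorem pvD_step {n : Int} (hn : 2 ≤ n) {k : Nat} (hk : (k : Int) + 1 < 4 * n) :
    pvD n (k + 1) =
      if (pvP n (k + 1)).1 = 0 ∨ (pvP n (k + 1)).2 = 0
      then (-(pvD n k).2, (pvD n k).1) else pvD n k := by
  have hcond : ((pvP n (k + 1)).1 = 0 ∨ (pvP n (k + 1)).2 = 0) ↔
      ((k : Int) + 1 = n ∨ (k : Int) + 1 = 2 * n ∨ (k : Int) + 1 = 3 * n) := by
    simp only [pvP]
    push_cast
    split_ifs <;> simp only <;> omega
  simp only [hcond]
  simp only [pvD]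
  push_cast
  split_ifs <;> simp only [Prod.mk.injEq, neg_neg] <;> omega

theorem pvP_wrap {n : Int} (hn : 2 ≤ n) {k : Nat} (hk : (k : Int) = 4 * n) :
    pvP n k = pvP n 0 := by
  simp only [pvP]
  split_ifs <;> simp_all [Prod.ext_iff] <;> omega

theorem pvP_not_mem {n : Int} (hn : 2 ≤ n) {k : Nat} (hk : (k : Int) < 4 * n) :
    pvP n k ∉ (List.range k).map (pvP n) := by
  intro hmem
  obtain ⟨i, hi, hPi⟩ := List.mem_map.mp hmem
  rw [List.mem_range] at hi
  have : i = k := pvP_inj hn (by omega) (by omega) hPi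
  omega

theorem walk {n : Int} (hn : 2 ≤ n) : ∀ (r k : Nat), (k : Int) + r = 4 * n →
    ∀ dx dy : Int, ((k : Int) < 4 * n → (dx, dy) = pvD n k) →
    get_cheat_loop (r + 1) ((List.range k).map (pvP n)) (pvP n k).1 (pvP n k).2 dx dy
      = (List.range (4 * n).toNat).map (pvP n) := by
  intro r
  induction r with
  | zero =>
    intro k hk dx dy _
    have hk0 : pvP n k = pvP n 0 := pvP_wrap hn (by omega)
    have hmem : pvP n k ∈ (List.range k).map (pvP n) := by
      rw [hk0]
      exact List.mem_map.mpr ⟨0, List.mem_range.mpr (by omega), rfl⟩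
    have hkeq : k = (4 * n).toNat := by omega
    simp only [get_cheat_loop, PySem.Set.contains_iff]
    rw [if_pos]
    · rw [hkeq]
    · simpa [PySem.Set.contains_iff] using hmem
  | succ r ih =>
    intro k hk dx dy hdir
    have hklt : (k : Int) < 4 * n := by omega
    have hd : (dx, dy) = pvD n k := hdir hklt
    have hnm := pvP_not_mem hn hklt
    have hcontains : PySem.Set.contains ((List.range k).map (pvP n)) (pvP n k) = false := by
      rw [← Bool.not_eq_true, PySem.Set.contains_iff]; exact hnm
    have hadd : PySem.Set.add ((List.range k).map (pvP n)) (pvP n k)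
        = (List.range (k + 1)).map (pvP n) := by
      rw [PySem.Set.add_of_not_mem hnm, List.range_succ, List.map_append, List.map_singleton]
    have hpos1 : (pvP n k).1 + dx = (pvP n (k + 1)).1 := by
      rw [pvP_step hn hklt, ← hd]
    have hpos2 : (pvP n k).2 + dy = (pvP n (k + 1)).2 := by
      rw [pvP_step hn hklt, ← hd]
    show get_cheat_loop (r + 1 + 1) _ _ _ _ _ = _
    rw [get_cheat_loop, if_neg (by rw [hcontains]; simp), hadd, hpos1, hpos2]
    by_cases hcond : (pvP n (k + 1)).1 = 0 ∨ (pvP n (k + 1)).2 = 0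
    · rw [if_pos hcond]
      exact ih (k + 1) (by push_cast; omega) (-dy) dx (by
        intro hlt
        rw [pvD_step hn (by push_cast at hlt ⊢; omega), if_pos hcond, ← hd])
    · rw [if_neg hcond]
      exact ih (k + 1) (by push_cast; omega) dx dy (by
        intro hlt
        rw [pvD_step hn (by push_cast at hlt ⊢; omega), if_neg hcond, ← hd])

-- the first half of B's list (a = -n .. n) is the walk's first 2n+1 points
theorem bottom_eq {n : Int} (hn : 2 ≤ n) :
    (PySem.List.pyRange (-n) (n + 1) 1).map (fun a => (a, |a| - n))
      = (List.range (2 * n + 1).toNat).map (pvP n) := by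
  rw [PySem.List.pyRange_one, List.map_map]
  have hlen : ((n + 1) - (-n)).toNat = (2 * n + 1).toNat := by omega
  rw [hlen]
  refine List.map_congr_left ?_
  intro k hk
  rw [List.mem_range] at hk
  have hk' : (k : Int) ≤ 2 * n := by omega
  simp only [Function.comp_apply, pvP, Prod.ext_iff]
  by_cases h : (k : Int) ≤ n
  · rw [abs_of_nonpos (by omega)]
    split_ifs <;> constructor <;> omega
  · rw [abs_of_nonneg (by omega)]
    split_ifs <;> constructor <;> omega

-- the second half of B's list (a = n-1 down to -n+1) is the walk's remaining points
theorem top_eq {n : Int} (hn : 2 ≤ n) :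
    (PySem.List.pyRange (n - 1) (-n) (-1)).map (fun a => (a, n - |a|))
      = (List.range (2 * n - 1).toNat).map (fun j => pvP n ((2 * n + 1).toNat + j)) := by
  rw [PySem.List.pyRange_neg_one_eq_reverse, PySem.List.pyRange_one]
  have hlen : ((n - 1 + 1) - (-n + 1)).toNat = (2 * n - 1).toNat := by omega
  rw [hlen]
  apply List.ext_getElem
  · simp
  · intro i h1 h2
    simp only [List.getElem_map, List.getElem_reverse, List.length_map, List.length_range,
      List.getElem_range]
    simp only [List.length_map, List.length_reverse, List.length_range] at h1 h2
    have hi : i < (2 * n - 1).toNat := h2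
    have hcast : ((((2 * n - 1).toNat - 1 - i : Nat)) : Int) = 2 * n - 2 - i := by omega
    have harg : (-n + 1 + (((2 * n - 1).toNat - 1 - i : Nat) : Int)) = n - 1 - i := by
      rw [hcast]; omega
    rw [harg]
    have hidx : (((2 * n + 1).toNat + i : Nat) : Int) = 2 * n + 1 + i := by
      push_cast; omega
    simp only [pvP, hidx, Prod.ext_iff]
    by_cases h : (i : Int) ≤ n - 1
    · rw [abs_of_nonneg (by omega)]
      split_ifs <;> constructor <;> omega
    · rw [abs_of_nonpos (by omega)]
      split_ifs <;> constructor <;> omega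

theorem b_list_eq {n : Int} (hn : 2 ≤ n) :
    (PySem.List.pyRange (-n) (n + 1) 1).map (fun a => (a, |a| - n)) ++
      (PySem.List.pyRange (n - 1) (-n) (-1)).map (fun a => (a, n - |a|))
      = (List.range (4 * n).toNat).map (pvP n) := by
  rw [bottom_eq hn, top_eq hn]
  have h4 : (4 * n).toNat = (2 * n + 1).toNat + (2 * n - 1).toNat := by omega
  rw [h4, List.range_add, List.map_append, List.map_map]
  rfl

theorem full_nodup {n : Int} (hn : 2 ≤ n) :
    ((List.range (4 * n).toNat).map (pvP n)).Nodup := by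
  refine List.Nodup.map_on ?_ (List.nodup_range)
  intro i hi j hj h
  rw [List.mem_range] at hi hj
  exact pvP_inj hn (by omega) (by omega) h

-- ===== VERDICT (by name: the statement is the Claim_ definition above) =====
theorem get_cheat_spec : Claim_equal_get_cheat := by
  intro n _
  unfold Spec_get_cheat get_cheat get_cheat_alt
  by_cases h : n < 2
  · rw [if_pos h, if_pos h]
  · rw [if_neg h, if_neg h]
    have hn : 2 ≤ n := by omega
    have hfuel : (4 * n + 1).toNat = (4 * n).toNat + 1 := by omega
    have h0 : pvP n 0 = (-n, 0) := by
      simp only [pvP]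
      rw [if_pos (by push_cast; omega)]
      norm_num
    have hw := walk hn (4 * n).toNat 0 (by omega) 1 (-1) (by
      intro _
      simp only [pvD]
      rw [if_pos (by push_cast; omega)])
    rw [h0, List.range_zero, List.map_nil] at hw
    simp only at hw
    rw [hfuel]
    have hempty : (PySem.Set.empty : PySem.Set (Int × Int)) = [] := rfl
    rw [hempty, hw, b_list_eq hn,
      PySem.Set.ofList_eq_self_of_nodup _ (full_nodup hn)]
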